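-- pv_equiv track=rewrite | github.com/LevRoz630/crypto-backtester | backtest/position_managers/v1_ls_pm.py | _prioritize_close_orders
-- ===== SOURCE A (Python) =====
-- from typing import Any
--
-- def _prioritize_close_orders(orders: list[dict[str, Any]]) -> list[dict[str, Any]]:
--     by_symbol = {}
--     for o in orders:
--         sym = o.get("symbol")
--         if not sym:
--             continue
--         if o.get("side") == "CLOSE" or sym not in by_symbol or by_symbol[sym].get("side") != "CLOSE":
--             by_symbol[sym] = o
--     return list(by_symbol.values())
-- ===== SOURCE B (Python) =====
-- from typing import Any
--
-- def _prioritize_close_orders(orders: list[dict[str, Any]]) -> list[dict[str, Any]]: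
--     # group-by symbol (first-appearance order), then per-group pick last CLOSE else last
--     groups: dict[str, list] = {}
--     for o in orders:
--         sym = o.get("symbol")
--         if not sym:
--             continue
--         groups.setdefault(sym, []).append(o)
--     result = []
--     for group in groups.values():
--         chosen = None
--         for o in reversed(group):
--             if o.get("side") == "CLOSE":
--                 chosen = o
--                 break
--         result.append(chosen if chosen is not None else group[-1])
--     return result
-- ===== Notes on version B (the rewrite author's own statement) =====
-- stated objective: alternative
-- what changed: A streams orders through one dict with a priority-guarded overwrite; B groups orders by symbol in a first pass and then reduces each group in a second pass (last CLOSE order, else last order).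
import Mathlib
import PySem

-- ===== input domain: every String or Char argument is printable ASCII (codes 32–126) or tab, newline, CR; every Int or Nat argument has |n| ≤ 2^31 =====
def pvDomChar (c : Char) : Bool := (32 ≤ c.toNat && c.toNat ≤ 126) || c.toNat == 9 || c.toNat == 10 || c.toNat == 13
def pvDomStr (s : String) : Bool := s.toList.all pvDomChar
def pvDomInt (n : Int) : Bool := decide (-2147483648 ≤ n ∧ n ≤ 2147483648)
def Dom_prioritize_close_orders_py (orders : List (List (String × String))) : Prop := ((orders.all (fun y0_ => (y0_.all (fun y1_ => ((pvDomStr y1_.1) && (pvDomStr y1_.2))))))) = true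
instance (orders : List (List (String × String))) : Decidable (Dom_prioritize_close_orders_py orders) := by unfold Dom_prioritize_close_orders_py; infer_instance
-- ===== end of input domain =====

-- ===== PORT A =====
-- B differs from A by decomposition: A streams a priority-guarded dict update; B groups by symbol, then reduces each group (last CLOSE, else last). Return values proved equal.
-- o.get(k) on the order dict (first-match association-list lookup)
def pvGet (o : List (String × String)) (k : String) : Option String :=
  (PySem.Dict.mk o).get? k

-- sym = o.get("symbol"); 'if not sym: continue' (missing or empty string is falsy)
def pvSym (o : List (String × String)) : Option String :=
  match pvGet o "symbol" with
  | none => none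
  | some s => if s = "" then none else some s

-- o.get("side") == "CLOSE"
def pvIsClose (o : List (String × String)) : Bool :=
  pvGet o "side" == some "CLOSE"

-- one iteration of A's loop body
def pvStepA (d : PySem.Dict String (List (String × String))) (o : List (String × String)) :
    PySem.Dict String (List (String × String)) :=
  match pvSym o with
  | none => d
  | some sym =>
      if pvIsClose o || !(d.contains sym) || !(pvIsClose (d.getD sym [])) then d.insert sym o else d

def prioritize_close_orders_py (orders : List (List (String × String))) : List (List (String × String)) :=
  (orders.foldl pvStepA PySem.Dict.empty).values

-- ===== PORT B =====
-- one iteration of B's grouping loop: groups.setdefault(sym, []).append(o)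
def pvStepB (g : PySem.Dict String (List (List (String × String)))) (o : List (String × String)) :
    PySem.Dict String (List (List (String × String))) :=
  match pvSym o with
  | none => g
  | some sym => g.modify sym [] (fun l => l ++ [o])

-- B's per-group reduction: last CLOSE order in the group, else the last order
def pvSelect (grp : List (List (String × String))) : List (String × String) :=
  match grp.reverse.find? pvIsClose with
  | some o => o
  | none => grp.reverse.headD []

def prioritize_close_orders_py_alt (orders : List (List (String × String))) : List (List (String × String)) :=
  ((orders.foldl pvStepB PySem.Dict.empty).values).map pvSelect

-- ===== PRECONDITION & SPEC =====
def Spec_prioritize_close_orders_py (orders : List (List (String × String))) (out : List (List (String × String))) : Prop := out = prioritize_close_orders_py_alt orders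
instance (orders : List (List (String × String))) (out : List (List (String × String))) : Decidable (Spec_prioritize_close_orders_py orders out) := by unfold Spec_prioritize_close_orders_py; infer_instance

-- ===== CLAIM (what is proved, stated in full; the proofs are below) =====
def Claim_equal_prioritize_close_orders_py : Prop := ∀ (orders : List (List (String × String))), Dom_prioritize_close_orders_py orders → Spec_prioritize_close_orders_py orders (prioritize_close_orders_py orders)

-- ===== LEMMAS AND PROOFS =====

-- selecting from a fresh singleton group gives that order
lemma pvSelect_singleton (o : List (String × String)) : pvSelect [o] = o := by
  by_cases h : pvIsClose o <;> simp [pvSelect, List.find?, h]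

-- an empty group is not CLOSE (pvIsClose [] = false)
lemma pvIsClose_nil : pvIsClose [] = false := by decide

-- appending an order to a group: the selection is o exactly when A's guard fires
lemma pvSelect_append (grp : List (List (String × String))) (o : List (String × String)) :
    pvSelect (grp ++ [o]) =
      if pvIsClose o || !(pvIsClose (pvSelect grp)) then o else pvSelect grp := by
  by_cases h : pvIsClose o
  · simp [pvSelect, h]
  · simp only [Bool.not_eq_true] at h
    cases hf : grp.reverse.find? pvIsClose with
    | some c =>
        have hc : pvIsClose c := List.find?_some hf
        simp [pvSelect, h, hf, hc]
    | none =>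
        have hni : pvIsClose (grp.getLast?.getD []) = false := by
          cases hg : grp.getLast? with
          | none => simpa using pvIsClose_nil
          | some a =>
              have ha : a ∈ grp.reverse := List.mem_reverse.mpr (List.mem_of_getLast? hg)
              simpa using List.find?_eq_none.mp hf a ha
        simp [pvSelect, h, hf, hni]

-- the main loop invariant: A's dict items are the pointwise selection of B's group dict items
lemma pv_main (orders : List (List (String × String)))
    (d : PySem.Dict String (List (String × String)))
    (g : PySem.Dict String (List (List (String × String))))
    (hnd : g.keys.Nodup)
    (hinv : d.items = g.items.map (fun p => (p.1, pvSelect p.2))) :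
    (orders.foldl pvStepA d).items
      = (orders.foldl pvStepB g).items.map (fun p => (p.1, pvSelect p.2)) := by
  induction orders generalizing d g with
  | nil => simpa using hinv
  | cons o rest ih =>
      simp only [List.foldl_cons]
      cases hs : pvSym o with
      | none =>
          have hA : pvStepA d o = d := by simp [pvStepA, hs]
          have hB : pvStepB g o = g := by simp [pvStepB, hs]
          rw [hA, hB]; exact ih _ _ hnd hinv
      | some sym =>
          have hkeys : d.keys = g.keys := by
            simp only [PySem.Dict.keys, hinv, List.map_map]; rfl
          have hdnd : d.keys.Nodup := hkeys ▸ hnd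
          have hcont : d.contains sym = g.contains sym := by
            rw [PySem.Dict.contains_eq_decide_mem_keys, PySem.Dict.contains_eq_decide_mem_keys, hkeys]
          by_cases hc : g.contains sym = true
          · -- sym already has a group
            have hsome : (g.get? sym).isSome := by
              rw [← PySem.Dict.contains_eq_isSome_get?]; exact hc
            obtain ⟨grp, hgrp⟩ := Option.isSome_iff_exists.mp hsome
            have hmem : (sym, grp) ∈ g.items := PySem.Dict.mem_items_of_get?_eq_some g hgrp
            have hgetD : g.getD sym [] = grp := PySem.Dict.getD_of_get?_eq_some g [] hgrp
            have hdget : d.getD sym [] = pvSelect grp := by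
              apply PySem.Dict.getD_of_mem_items d ?_ hdnd
              rw [hinv]; exact List.mem_map_of_mem hmem
            have hB : pvStepB g o = g.insert sym (grp ++ [o]) := by
              simp [pvStepB, hs, PySem.Dict.modify, hgetD]
            have hdc : d.contains sym = true := hcont.trans hc
            apply ih _ _ (by rw [hB]; exact PySem.Dict.nodup_keys_insert g sym (grp ++ [o]) hnd)
            rw [hB, PySem.Dict.items_insert_of_contains g _ hc]
            simp only [pvStepA, hs, hdc, hdget, Bool.not_true, Bool.or_false]
            by_cases hcond : (pvIsClose o || !(pvIsClose (pvSelect grp))) = true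
            · rw [if_pos hcond, PySem.Dict.items_insert_of_contains d _ hdc, hinv,
                List.map_map, List.map_map]
              apply List.map_congr_left
              intro p _
              by_cases hp : p.1 = sym <;>
                simp [Function.comp, hp, pvSelect_append, hcond]
            · rw [if_neg hcond, hinv, List.map_map]
              apply List.map_congr_left
              intro p hp
              by_cases hpk : p.1 = sym
              · have : g.get? p.1 = some p.2 := PySem.Dict.get?_of_mem_items g hp hnd
                have hp2 : p.2 = grp := by
                  rw [hpk] at this; rw [hgrp] at this; exact (Option.some_inj.mp this).symm
                simp only [Bool.not_eq_true] at hcond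
                simp [Function.comp, hpk, hp2, pvSelect_append, hcond]
              · simp [Function.comp, hpk]
          · -- sym is new
            have hcf : g.contains sym = false := by simpa using hc
            have hdcf : d.contains sym = false := hcont.trans hcf
            have hB : pvStepB g o = g.insert sym [o] := by
              simp [pvStepB, hs, PySem.Dict.modify, PySem.Dict.getD_of_not_contains g [] hcf]
            apply ih _ _ (by rw [hB]; exact PySem.Dict.nodup_keys_insert g sym [o] hnd)
            rw [hB, PySem.Dict.items_insert_of_not_contains g _ hcf]
            simp only [pvStepA, hs, hdcf, Bool.not_false, Bool.or_true, Bool.true_or, if_pos]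
            rw [PySem.Dict.items_insert_of_not_contains d _ hdcf, hinv]
            simp [pvSelect_singleton]

-- ===== VERDICT (by name: the statement is the Claim_ definition above) =====
theorem prioritize_close_orders_py_spec : Claim_equal_prioritize_close_orders_py := by
  intro orders _
  unfold Spec_prioritize_close_orders_py prioritize_close_orders_py prioritize_close_orders_py_alt
  have h := pv_main orders PySem.Dict.empty PySem.Dict.empty (by decide) (by rfl)
  simp only [PySem.Dict.values, h, List.map_map]
  rfl
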